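-- pv_equiv track=rewrite | github.com/aws/aws-cli | awscli/customizations/cloudformation/modules/flatten.py | _split_pattern_into_segments
-- ===== SOURCE A (Python) =====
-- def _split_pattern_into_segments(pattern):
--     """
--     Split a JSONPath-like pattern into segments.
--
--     Args:
--         pattern: A JSONPath-like pattern string
--
--     Returns:
--         List of pattern segments
--     """
--     segments = []
--     current_segment = ""
--     in_brackets = False
--
--     for char in pattern:
--         if char == "[" and not in_brackets:
--             if current_segment:
--                 segments.append(current_segment)
--                 current_segment = ""
--             in_brackets = True
--             current_segment += char
--         elif char == "]" and in_brackets: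
--             current_segment += char
--             in_brackets = False
--             segments.append(current_segment)
--             current_segment = ""
--         elif char == "." and not in_brackets:
--             if current_segment:
--                 segments.append(current_segment)
--                 current_segment = ""
--         else:
--             current_segment += char
--
--     if current_segment:
--         segments.append(current_segment)
--
--     return segments
-- ===== SOURCE B (Python) =====
-- def _split_pattern_into_segments(pattern):
--     """
--     Split a JSONPath-like pattern into segments.
--
--     Tokenizer: instead of a char-by-char state machine, scan ahead from each
--     position: skip a dot separator, take a whole bracket group at once via
--     find, or take a maximal run of plain text.
--     """
--     segments = []
--     i = 0
--     n = len(pattern)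
--     while i < n:
--         c = pattern[i]
--         if c == '.':
--             i += 1
--         elif c == '[':
--             j = pattern.find(']', i)
--             if j == -1:
--                 segments.append(pattern[i:])
--                 i = n
--             else:
--                 segments.append(pattern[i:j + 1])
--                 i = j + 1
--         else:
--             j = i
--             while j < n and pattern[j] != '.' and pattern[j] != '[':
--                 j += 1
--             segments.append(pattern[i:j])
--             i = j
--     return segments
-- ===== Notes on version B (the rewrite author's own statement) =====
-- stated objective: idiomatic
-- what changed: Replaced the char-by-char state machine (current_segment buffer + in_brackets flag) with a look-ahead tokenizer that at each position skips a dot separator, grabs a whole bracket group at once via find, or takes a maximal run of plain text.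
import Mathlib
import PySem

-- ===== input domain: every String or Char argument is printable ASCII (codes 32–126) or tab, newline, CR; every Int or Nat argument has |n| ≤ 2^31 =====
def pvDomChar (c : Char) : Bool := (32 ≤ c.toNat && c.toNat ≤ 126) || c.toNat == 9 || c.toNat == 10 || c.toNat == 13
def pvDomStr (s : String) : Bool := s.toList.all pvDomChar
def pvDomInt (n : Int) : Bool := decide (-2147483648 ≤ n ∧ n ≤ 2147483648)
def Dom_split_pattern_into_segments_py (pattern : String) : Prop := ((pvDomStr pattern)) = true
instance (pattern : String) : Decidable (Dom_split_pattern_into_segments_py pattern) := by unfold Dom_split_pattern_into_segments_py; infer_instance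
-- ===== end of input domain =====

-- B replaces A's char-by-char state machine by a look-ahead tokenizer (skip a dot, grab a whole
-- bracket group, or a maximal text run per step); same results, idiomatic rewrite (no speed claim).

-- ===== PORT A =====
-- one step of A's for-loop; state = (segments, current_segment as List Char, in_brackets)
def pvAStep (st : List String × List Char × Bool) (c : Char) : List String × List Char × Bool :=
  match st with
  | (segments, current, inB) =>
    if c == '[' && !inB then
      ((if current.isEmpty then segments else segments ++ [String.mk current]), [c], true)
    else if c == ']' && inB then
      (segments ++ [String.mk (current ++ [c])], [], false)
    else if c == '.' && !inB then
      ((if current.isEmpty then segments else segments ++ [String.mk current]), [], false)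
    else
      (segments, current ++ [c], inB)

def split_pattern_into_segments_py (pattern : String) : List String :=
  match pattern.toList.foldl pvAStep ([], [], false) with
  | (segments, current, _) =>
    if current.isEmpty then segments else segments ++ [String.mk current]

-- ===== PORT B =====
def pvTextP (x : Char) : Bool := x != '.' && x != '['   -- plain-text characters
def pvBrkP (x : Char) : Bool := x != ']'                -- still inside a bracket group

-- Source B's while-loop as recursion on the unread suffix; the inner scans (find ']' / run of text)
-- are cs.takeWhile/dropWhile
def pvAltGo : List Char → List String
  | [] => []
  | c :: cs =>
    if c == '.' then pvAltGo cs
    else if c == '[' then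
      match h : cs.dropWhile pvBrkP with
      | [] => [String.mk (c :: cs.takeWhile pvBrkP)]
      | r :: rest => String.mk (c :: (cs.takeWhile pvBrkP ++ [r])) :: pvAltGo rest
    else
      String.mk (c :: cs.takeWhile pvTextP) :: pvAltGo (cs.dropWhile pvTextP)
termination_by cs => cs.length
decreasing_by
  · simp
  · have h1 : (cs.dropWhile pvBrkP).length ≤ cs.length := cs.length_dropWhile_le pvBrkP
    rw [h] at h1; simp at h1 ⊢; omega
  · have h1 : (cs.dropWhile pvTextP).length ≤ cs.length := cs.length_dropWhile_le pvTextP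
    simp; omega

def split_pattern_into_segments_py_alt (pattern : String) : List String :=
  pvAltGo pattern.toList

-- ===== PRECONDITION & SPEC =====
def Spec_split_pattern_into_segments_py (pattern : String) (out : List String) : Prop := out = split_pattern_into_segments_py_alt pattern
instance (pattern : String) (out : List String) : Decidable (Spec_split_pattern_into_segments_py pattern out) := by unfold Spec_split_pattern_into_segments_py; infer_instance

-- ===== CLAIM (what is proved, stated in full; the proofs are below) =====
def Claim_equal_split_pattern_into_segments_py : Prop := ∀ (pattern : String), Dom_split_pattern_into_segments_py pattern → Spec_split_pattern_into_segments_py pattern (split_pattern_into_segments_py pattern)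

-- ===== LEMMAS AND PROOFS =====
-- emit a text segment only if nonempty (A's 'if current_segment:')
def pvEmit (l : List Char) : List String := if l.isEmpty then [] else [String.mk l]

-- finalization after A's loop
def pvFinal (st : List String × List Char × Bool) : List String :=
  match st with
  | (segments, current, _) => if current.isEmpty then segments else segments ++ [String.mk current]

-- continuation of B from a bracket state with accumulated prefix cur
def pvBrkCont (cur : List Char) (cs : List Char) : List String :=
  match cs.dropWhile pvBrkP with
  | [] => pvEmit (cur ++ cs)
  | r :: rest => String.mk (cur ++ cs.takeWhile pvBrkP ++ [r]) :: pvAltGo rest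

lemma pvAltGo_eq_emit (cs : List Char) :
    pvAltGo cs = pvEmit (cs.takeWhile pvTextP) ++ pvAltGo (cs.dropWhile pvTextP) := by
  cases cs with
  | nil => simp [pvAltGo, pvEmit]
  | cons c cs =>
    by_cases h1 : c = '.'
    · subst h1; simp [pvAltGo, List.takeWhile, List.dropWhile, pvTextP, pvEmit]
    · by_cases h2 : c = '['
      · subst h2; simp [pvAltGo, List.takeWhile, List.dropWhile, pvTextP, pvEmit]
      · have hp : pvTextP c = true := by simp [pvTextP, h1, h2]
        rw [pvAltGo]
        simp [List.takeWhile, List.dropWhile, hp, pvEmit, h1, h2]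

lemma pvMain (cs : List Char) :
    (∀ (segs : List String) (cur : List Char),
        pvFinal (cs.foldl pvAStep (segs, cur, true)) = segs ++ pvBrkCont cur cs) ∧
    (∀ (segs : List String) (cur : List Char),
        pvFinal (cs.foldl pvAStep (segs, cur, false)) =
          segs ++ pvEmit (cur ++ cs.takeWhile pvTextP) ++ pvAltGo (cs.dropWhile pvTextP)) := by
  induction cs with
  | nil =>
    constructor
    · intro segs cur
      simp [pvFinal, pvBrkCont, pvEmit, List.dropWhile]
      split <;> simp_all [pvEmit]
    · intro segs cur
      simp [pvFinal, pvAltGo, pvEmit, List.takeWhile, List.dropWhile]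
      split <;> simp_all
  | cons c cs ih =>
    obtain ⟨ihT, ihF⟩ := ih
    constructor
    · -- in_brackets = true
      intro segs cur
      by_cases h1 : c = ']'
      · subst h1
        rw [List.foldl_cons]
        have hstep : pvAStep (segs, cur, true) ']' =
            (segs ++ [String.mk (cur ++ [']'])], [], false) := by
          simp [pvAStep]
        rw [hstep, ihF]
        rw [pvBrkCont]
        simp [List.dropWhile, List.takeWhile, pvBrkP, pvEmit, pvAltGo_eq_emit cs]
      · rw [List.foldl_cons]
        have hstep : pvAStep (segs, cur, true) c = (segs, cur ++ [c], true) := by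
          by_cases h2 : c = '[' <;> by_cases h3 : c = '.' <;> simp_all [pvAStep]
        rw [hstep, ihT]
        have hq : pvBrkP c = true := by simp [pvBrkP, h1]
        rw [pvBrkCont, pvBrkCont]
        simp only [List.dropWhile, List.takeWhile, hq]
        split <;> simp [pvEmit]
    · -- in_brackets = false
      intro segs cur
      by_cases h1 : c = '.'
      · subst h1
        rw [List.foldl_cons]
        have hstep : pvAStep (segs, cur, false) '.' = ((if cur.isEmpty then segs else segs ++ [String.mk cur]), [], false) := by
          simp [pvAStep]
        rw [hstep, ihF]
        have hd : List.dropWhile pvTextP ('.' :: cs) = '.' :: cs := by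
          simp [List.dropWhile, pvTextP]
        have ht : List.takeWhile pvTextP ('.' :: cs) = ([] : List Char) := by
          simp [List.takeWhile, pvTextP]
        rw [hd, ht]
        have halt : pvAltGo ('.' :: cs) = pvAltGo cs := by rw [pvAltGo]; simp
        rw [halt, pvAltGo_eq_emit cs]
        cases cur <;> simp [pvEmit]
      · by_cases h2 : c = '['
        · subst h2
          rw [List.foldl_cons]
          have hstep : pvAStep (segs, cur, false) '[' = ((if cur.isEmpty then segs else segs ++ [String.mk cur]), ['['], true) := by
            simp [pvAStep]
          rw [hstep, ihT]
          have hd : List.dropWhile pvTextP ('[' :: cs) = '[' :: cs := by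
            simp [List.dropWhile, pvTextP]
          have ht : List.takeWhile pvTextP ('[' :: cs) = ([] : List Char) := by
            simp [List.takeWhile, pvTextP]
          rw [hd, ht]
          have halt : pvAltGo ('[' :: cs) = pvBrkCont ['['] cs := by
            rw [pvAltGo, pvBrkCont]
            cases h : List.dropWhile pvBrkP cs with
            | nil =>
              have hself : List.takeWhile pvBrkP cs = cs := by
                have h2 := List.takeWhile_append_dropWhile (p := pvBrkP) (l := cs)
                rw [h] at h2; simpa using h2
              simp [hself, pvEmit]
            | cons r rest => simp
          rw [halt]
          cases cur <;> simp [pvEmit]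
        · rw [List.foldl_cons]
          have hstep : pvAStep (segs, cur, false) c = (segs, cur ++ [c], false) := by
            simp_all [pvAStep]
          rw [hstep, ihF]
          have hp : pvTextP c = true := by simp [pvTextP, h1, h2]
          simp [List.takeWhile, List.dropWhile, hp]

-- ===== VERDICT (by name: the statement is the Claim_ definition above) =====
theorem split_pattern_into_segments_py_spec : Claim_equal_split_pattern_into_segments_py := by
  intro pattern _
  unfold Spec_split_pattern_into_segments_py
  have hA : split_pattern_into_segments_py pattern
      = pvFinal (pattern.toList.foldl pvAStep ([], ([], false))) := rfl
  rw [hA, (pvMain pattern.toList).2 [] []]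
  simp only [List.nil_append, split_pattern_into_segments_py_alt]
  rw [← pvAltGo_eq_emit]
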